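-- pv_equiv track=rewrite | github.com/christianrosdahl/aoc2022 | day15/aoc15.py | unblocked_points
-- ===== SOURCE A (Python) =====
-- def unblocked_points(intervals, limits):
--     # Get all integer points between limits = (x1, x2)
--     # that are not covered by any interval listed in intervals
--     points = [] # All interval end points
--     points.append((limits[0], 'limit'))
--     points.append((limits[1], 'limit'))
--     for i in intervals:
--         points.append((i[0], 'start'))
--         points.append((i[1], 'end'))
--     points.sort(key = lambda i: i[0])
--     active_intervals = 0 # Number of active intervals
--     free_points = [] # Unblocked points
--     for i in range(len(points)-1):
--         if points[i][1] == 'start':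
--             active_intervals += 1
--         elif points[i][1] == 'end':
--             active_intervals -= 1
--         if active_intervals == 0:
--             free_points += list(range(points[i][0]+1, points[i+1][0]))
--     return free_points
-- ===== SOURCE B (Python) =====
-- def unblocked_points(intervals, limits):
--     # Walk consecutive distinct coordinates; the gap after p is free iff the
--     # number of interval starts <= p equals the number of interval ends <= p.
--     coords = sorted({limits[0], limits[1],
--                      *(s for s, e in intervals), *(e for s, e in intervals)})
--     free = []
--     for p, q in zip(coords, coords[1:]):
--         if sum(s <= p for s, e in intervals) == sum(e <= p for s, e in intervals):
--             free += range(p + 1, q)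
--     return free
-- ===== Notes on version B (the rewrite author's own statement) =====
-- stated objective: simpler
-- what changed: B replaces A's tagged-event list ((value,'start'/'end'/'limit') tuples sorted together with a signed active-interval counter swept across every event) by a walk over the sorted set of distinct coordinates that decides each gap independently by comparing the number of interval starts <= p with the number of ends <= p.
import Mathlib
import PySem

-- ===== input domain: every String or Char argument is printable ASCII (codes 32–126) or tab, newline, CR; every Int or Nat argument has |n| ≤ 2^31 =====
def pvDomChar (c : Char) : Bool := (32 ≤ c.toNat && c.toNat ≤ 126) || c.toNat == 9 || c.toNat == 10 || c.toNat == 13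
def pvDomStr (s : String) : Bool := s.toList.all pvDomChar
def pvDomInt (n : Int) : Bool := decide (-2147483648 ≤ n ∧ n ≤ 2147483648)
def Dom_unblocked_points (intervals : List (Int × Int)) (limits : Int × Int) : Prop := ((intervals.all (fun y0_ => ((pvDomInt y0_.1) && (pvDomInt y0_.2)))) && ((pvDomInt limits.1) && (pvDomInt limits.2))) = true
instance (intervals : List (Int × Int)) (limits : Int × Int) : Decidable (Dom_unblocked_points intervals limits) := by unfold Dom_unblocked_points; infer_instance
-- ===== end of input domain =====

-- B walks the sorted set of distinct coordinates and decides each gap by comparing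
-- counts of interval starts/ends <= p, instead of A's tagged-event sweep with a signed counter.


-- ===== PORT A =====
-- for i in range(len(points)-1): update the counter from points[i]'s tag, then
-- emit range(points[i][0]+1, points[i+1][0]) when the counter is zero.
def pvSweepA : List (Int × String) → Int → List Int
  | p :: q :: rest, c =>
      let c' := if p.2 == "start" then c + 1 else if p.2 == "end" then c - 1 else c
      (if c' == 0 then PySem.List.pyRange (p.1 + 1) q.1 1 else []) ++ pvSweepA (q :: rest) c'
  | _, _ => []

def unblocked_points (intervals : List (Int × Int)) (limits : Int × Int) : List Int :=
  pvSweepA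
    (PySem.List.sorted
      ([(limits.1, "limit"), (limits.2, "limit")] ++
        intervals.flatMap (fun i => [(i.1, "start"), (i.2, "end")]))
      (fun i => i.1) false)
    0

-- ===== PORT B =====
-- for p, q in zip(coords, coords[1:]): emit range(p+1, q) when the number of
-- interval starts <= p equals the number of interval ends <= p.
def pvWalkB (intervals : List (Int × Int)) : List Int → List Int
  | p :: q :: rest =>
      (if intervals.countP (fun iv => decide (iv.1 ≤ p)) ==
          intervals.countP (fun iv => decide (iv.2 ≤ p))
       then PySem.List.pyRange (p + 1) q 1 else []) ++ pvWalkB intervals (q :: rest)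
  | _ => []

def unblocked_points_alt (intervals : List (Int × Int)) (limits : Int × Int) : List Int :=
  pvWalkB intervals
    (PySem.List.sorted
      (PySem.Set.ofList (limits.1 :: limits.2 ::
        (intervals.map (fun iv => iv.1) ++ intervals.map (fun iv => iv.2))))
      (fun x => x) false)

-- ===== PRECONDITION & SPEC =====
def Spec_unblocked_points (intervals : List (Int × Int)) (limits : Int × Int) (out : List Int) : Prop := out = unblocked_points_alt intervals limits
instance (intervals : List (Int × Int)) (limits : Int × Int) (out : List Int) : Decidable (Spec_unblocked_points intervals limits out) := by unfold Spec_unblocked_points; infer_instance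

-- ===== CLAIM (what is proved, stated in full; the proofs are below) =====
def Claim_equal_unblocked_points : Prop := ∀ (intervals : List (Int × Int)) (limits : Int × Int), Dom_unblocked_points intervals limits → Spec_unblocked_points intervals limits (unblocked_points intervals limits)

-- ===== LEMMAS AND PROOFS =====

-- signed counter value contributed by a list of tagged events
def pvNet (l : List (Int × String)) : Int :=
  (l.countP (fun e => e.2 == "start") : Int) - (l.countP (fun e => e.2 == "end") : Int)

-- collapse adjacent duplicates (of a sorted list)
def pvDedupAdj : List Int → List Int
  | x :: y :: rest => if x = y then pvDedupAdj (y :: rest) else x :: pvDedupAdj (y :: rest)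
  | l => l

lemma pvNet_append_single (pre : List (Int × String)) (p : Int × String) :
    pvNet (pre ++ [p]) =
      (if p.2 == "start" then pvNet pre + 1 else if p.2 == "end" then pvNet pre - 1 else pvNet pre) := by
  simp only [pvNet, List.countP_append, List.countP_cons, List.countP_nil]
  by_cases h1 : p.2 = "start" <;> by_cases h2 : p.2 = "end" <;>
    simp [h1, h2] <;> omega

lemma pvNet_perm {l l' : List (Int × String)} (h : l.Perm l') : pvNet l = pvNet l' := by
  simp only [pvNet, h.countP_eq]

lemma pvFilter_le_split (pre : List (Int × String)) (p : Int × String) (rest : List (Int × String))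
    (h1 : ∀ a ∈ pre, a.1 ≤ p.1) (h2 : ∀ b ∈ rest, ¬ (b.1 ≤ p.1)) :
    (pre ++ p :: rest).filter (fun e => decide (e.1 ≤ p.1)) = pre ++ [p] := by
  rw [List.filter_append, List.filter_cons]
  rw [List.filter_eq_self.mpr (fun a ha => by simpa using h1 a ha)]
  rw [List.filter_eq_nil_iff.mpr (fun b hb => by simpa using h2 b hb)]
  simp

lemma pvNet_append (xs ys : List (Int × String)) : pvNet (xs ++ ys) = pvNet xs + pvNet ys := by
  simp only [pvNet, List.countP_append]; push_cast; ring

-- the counter over the events with coordinate ≤ x, computed from the intervals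
lemma pvNet_points (intervals : List (Int × Int)) (l1 l2 x : Int) :
    pvNet (([(l1, "limit"), (l2, "limit")] ++
        intervals.flatMap (fun i => [(i.1, "start"), (i.2, "end")])).filter
        (fun e => decide (e.1 ≤ x))) =
      (intervals.countP (fun iv => decide (iv.1 ≤ x)) : Int) -
        (intervals.countP (fun iv => decide (iv.2 ≤ x)) : Int) := by
  induction intervals with
  | nil =>
      simp only [pvNet, List.flatMap_nil, List.append_nil, List.filter_cons, List.filter_nil]
      split_ifs <;> simp
  | cons iv ivs ih =>
      rw [List.flatMap_cons]
      have hperm : ([(l1, "limit"), (l2, "limit")] ++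
          ([(iv.1, "start"), (iv.2, "end")] ++ ivs.flatMap (fun i => [(i.1, "start"), (i.2, "end")]))).Perm
          (([(iv.1, "start"), (iv.2, "end")] : List (Int × String)) ++
          ([(l1, "limit"), (l2, "limit")] ++ ivs.flatMap (fun i => [(i.1, "start"), (i.2, "end")]))) := by
        rw [← List.append_assoc, ← List.append_assoc]
        exact (List.perm_append_comm).append_right _
      rw [pvNet_perm (hperm.filter _), List.filter_append, pvNet_append, ih]
      simp only [List.countP_cons, List.filter_cons, List.filter_nil]
      by_cases hs : iv.1 ≤ x <;> by_cases he : iv.2 ≤ x <;>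
        simp [hs, he, pvNet] <;> omega

-- A's sweep over a sorted event list equals B's walk over its coordinates
lemma pvSweepA_eq_walkB (intervals : List (Int × Int)) :
    ∀ (l pre : List (Int × String)) (c : Int),
      (pre ++ l).Pairwise (fun a b => a.1 ≤ b.1) →
      pvNet pre = c →
      (∀ x : Int, pvNet ((pre ++ l).filter (fun e => decide (e.1 ≤ x))) =
        (intervals.countP (fun iv => decide (iv.1 ≤ x)) : Int) -
          (intervals.countP (fun iv => decide (iv.2 ≤ x)) : Int)) →
      pvSweepA l c = pvWalkB intervals (l.map Prod.fst) := by
  intro l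
  induction l with
  | nil => intro pre c _ _ _; rfl
  | cons p l' ih =>
      intro pre c hsort hc hN
      cases l' with
      | nil => rfl
      | cons q rest =>
          have hassoc : pre ++ p :: q :: rest = (pre ++ [p]) ++ q :: rest := by simp
          have hsort' : ((pre ++ [p]) ++ q :: rest).Pairwise (fun a b => a.1 ≤ b.1) := by
            rw [← hassoc]; exact hsort
          have hc' : pvNet (pre ++ [p]) =
              (if p.2 == "start" then c + 1 else if p.2 == "end" then c - 1 else c) := by
            rw [pvNet_append_single, hc]
          have hN' : ∀ x : Int, pvNet (((pre ++ [p]) ++ q :: rest).filter (fun e => decide (e.1 ≤ x))) =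
              (intervals.countP (fun iv => decide (iv.1 ≤ x)) : Int) -
                (intervals.countP (fun iv => decide (iv.2 ≤ x)) : Int) := by
            intro x; rw [← hassoc]; exact hN x
          have hrec := ih (pre ++ [p]) _ hsort' hc' hN'
          rcases List.pairwise_append.mp hsort with ⟨hpre, hl, hcross⟩
          have hpq : p.1 ≤ q.1 := (List.pairwise_cons.mp hl).1 q (by simp)
          have hqrest : ∀ b ∈ rest, q.1 ≤ b.1 :=
            (List.pairwise_cons.mp (List.Pairwise.of_cons hl)).1
          show (if (if p.2 == "start" then c + 1 else if p.2 == "end" then c - 1 else c) == 0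
                then PySem.List.pyRange (p.1 + 1) q.1 1 else []) ++
              pvSweepA (q :: rest) (if p.2 == "start" then c + 1 else if p.2 == "end" then c - 1 else c) =
            (if intervals.countP (fun iv => decide (iv.1 ≤ p.1)) ==
                intervals.countP (fun iv => decide (iv.2 ≤ p.1))
             then PySem.List.pyRange (p.1 + 1) q.1 1 else []) ++
              pvWalkB intervals ((q :: rest).map Prod.fst)
          rw [hrec]
          rcases lt_or_eq_of_le hpq with hlt | heq
          · -- gates agree: the counter equals the start/end counts at p.1
            have hsplit : (pre ++ p :: q :: rest).filter (fun e => decide (e.1 ≤ p.1)) = pre ++ [p] :=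
              pvFilter_le_split pre p (q :: rest)
                (fun a ha => hcross a ha p (by simp))
                (by
                  intro b hb
                  rcases List.mem_cons.mp hb with rfl | hb'
                  · omega
                  · have := hqrest b hb'; omega)
            have hcnt : (if p.2 == "start" then c + 1 else if p.2 == "end" then c - 1 else c) =
                (intervals.countP (fun iv => decide (iv.1 ≤ p.1)) : Int) -
                  (intervals.countP (fun iv => decide (iv.2 ≤ p.1)) : Int) := by
              rw [← hc', ← hsplit, hN p.1]
            rw [hcnt]
            congr 1
            have hb : ∀ (a b : Nat), (((a : Int) - (b : Int)) == 0) = (a == b) := by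
              intro a b
              by_cases h : a = b
              · simp [h]
              · have h1 : (((a : Int) - (b : Int)) == 0) = false := by
                  simp only [beq_eq_false_iff_ne, ne_eq]; omega
                have h2 : (a == b) = false := by simp [h]
                rw [h1, h2]
            rw [hb]
          · -- equal coordinates: both ranges are empty
            rw [PySem.List.pyRange_one_eq_nil (by omega)]
            simp

lemma pvDedupAdj_head (rest : List Int) (y : Int) : ∃ t, pvDedupAdj (y :: rest) = y :: t := by
  induction rest generalizing y with
  | nil => exact ⟨[], rfl⟩
  | cons z r ih =>
      obtain ⟨t, ht⟩ := ih z
      by_cases h : y = z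
      · subst h; exact ⟨t, by simp [pvDedupAdj, ht]⟩
      · exact ⟨pvDedupAdj (z :: r), by simp [pvDedupAdj, h]⟩

lemma pvWalkB_dedup (intervals : List (Int × Int)) (l : List Int) :
    pvWalkB intervals l = pvWalkB intervals (pvDedupAdj l) := by
  induction l with
  | nil => rfl
  | cons x l' ih =>
      cases l' with
      | nil => rfl
      | cons y rest =>
          by_cases h : x = y
          · subst h
            rw [show pvDedupAdj (x :: x :: rest) = pvDedupAdj (x :: rest) by simp [pvDedupAdj], ← ih]
            show (if _ then PySem.List.pyRange (x + 1) x 1 else []) ++ pvWalkB intervals (x :: rest) = _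
            rw [PySem.List.pyRange_one_eq_nil (by omega)]
            simp
          · obtain ⟨t, ht⟩ := pvDedupAdj_head rest y
            rw [show pvDedupAdj (x :: y :: rest) = x :: pvDedupAdj (y :: rest) by simp [pvDedupAdj, h]]
            rw [ht]
            show _ ++ pvWalkB intervals (y :: rest) = _ ++ pvWalkB intervals (y :: t)
            rw [ih, ht]

lemma pvMem_dedupAdj (l : List Int) (a : Int) : a ∈ pvDedupAdj l ↔ a ∈ l := by
  induction l with
  | nil => rfl
  | cons x l' ih =>
      cases l' with
      | nil => rfl
      | cons y rest =>
          by_cases h : x = y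
          · subst h
            rw [show pvDedupAdj (x :: x :: rest) = pvDedupAdj (x :: rest) by simp [pvDedupAdj]]
            rw [ih]
            simp
          · rw [show pvDedupAdj (x :: y :: rest) = x :: pvDedupAdj (y :: rest) by simp [pvDedupAdj, h]]
            simp [ih]

lemma pvDedupAdj_pairwise (l : List Int) (h : l.Pairwise (· ≤ ·)) :
    (pvDedupAdj l).Pairwise (· < ·) := by
  revert h
  induction l with
  | nil => intro h; exact List.Pairwise.nil
  | cons x l' ih =>
      intro h
      cases l' with
      | nil => exact List.pairwise_singleton _ _
      | cons y rest =>
          have htail : (y :: rest).Pairwise (· ≤ ·) := List.Pairwise.of_cons h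
          by_cases hxy : x = y
          · rw [show pvDedupAdj (x :: y :: rest) = pvDedupAdj (y :: rest) from by simp [pvDedupAdj, hxy]]
            exact ih htail
          · rw [show pvDedupAdj (x :: y :: rest) = x :: pvDedupAdj (y :: rest) from by simp [pvDedupAdj, hxy]]
            refine List.pairwise_cons.mpr ⟨?_, ih htail⟩
            intro b hb
            rw [pvMem_dedupAdj] at hb
            have hx : ∀ b ∈ y :: rest, x ≤ b := (List.pairwise_cons.mp h).1
            have hxy' : x < y := lt_of_le_of_ne (hx y (by simp)) hxy
            rcases List.mem_cons.mp hb with rfl | hb'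
            · exact hxy'
            · exact lt_of_lt_of_le hxy' ((List.pairwise_cons.mp htail).1 b hb')

lemma pvStrict_sorted_eq {l1 l2 : List Int} (h1 : l1.Pairwise (· < ·)) (h2 : l2.Pairwise (· < ·))
    (hm : ∀ x, x ∈ l1 ↔ x ∈ l2) : l1 = l2 := by
  have n1 : l1.Nodup := h1.imp (fun hab => ne_of_lt hab)
  have n2 : l2.Nodup := h2.imp (fun hab => ne_of_lt hab)
  have hp : l1.Perm l2 := (List.perm_ext_iff_of_nodup n1 n2).mpr hm
  exact hp.eq_of_pairwise (fun a b _ _ hab hba => absurd hba (not_lt.mpr hab.le)) h1 h2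

-- ===== VERDICT (by name: the statement is the Claim_ definition above) =====
theorem unblocked_points_spec : Claim_equal_unblocked_points := by
  intro intervals limits _
  unfold Spec_unblocked_points unblocked_points unblocked_points_alt
  have hperm := PySem.List.sorted_perm
    ([(limits.1, "limit"), (limits.2, "limit")] ++
      intervals.flatMap (fun i => [(i.1, "start"), (i.2, "end")]))
    (fun i : Int × String => i.1) false
  have hsort := PySem.List.sorted_pairwise
    ([(limits.1, "limit"), (limits.2, "limit")] ++
      intervals.flatMap (fun i => [(i.1, "start"), (i.2, "end")]))
    (fun i : Int × String => i.1)
  have h1 := pvSweepA_eq_walkB intervals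
    (PySem.List.sorted
      ([(limits.1, "limit"), (limits.2, "limit")] ++
        intervals.flatMap (fun i => [(i.1, "start"), (i.2, "end")]))
      (fun i => i.1) false)
    [] 0 (by simpa using hsort) rfl
    (fun x => by rw [List.nil_append, pvNet_perm (hperm.filter _), pvNet_points])
  rw [h1, pvWalkB_dedup]
  congr 1
  apply pvStrict_sorted_eq
  · exact pvDedupAdj_pairwise _ (List.pairwise_map.mpr hsort)
  · exact PySem.List.sorted_ofList_pairwise_lt _
  · intro x
    rw [pvMem_dedupAdj, PySem.List.mem_sorted, PySem.Set.mem_ofList,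
      (hperm.map Prod.fst).mem_iff]
    simp only [List.map_append, List.map_cons, List.map_nil, List.map_flatMap,
      List.mem_append, List.mem_cons, List.mem_flatMap, List.mem_map, List.not_mem_nil, or_false]
    aesop
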